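-- pv_equiv track=rewrite | github.com/carlzimmerman/zimmerman-formula | research/proof_attempt/new_identity_exploration.py | trace_signs
-- ===== SOURCE A (Python) =====
-- from collections import defaultdict
--
-- def trace_signs(n, depth=3):
--     """Trace the expansion of M(n) in terms of M(k) for k < n."""
--     if depth == 0 or n < 1:
--         return {n: 1}
--
--     result = defaultdict(int)
--     for d in range(3, n + 1, 2):
--         sub = trace_signs(n // d, depth - 1)
--         for k, coeff in sub.items():
--             result[k] -= coeff  # Negative because of the recursion
--
--     if not result:
--         result[n] = 1
--
--     return dict(result)
-- ===== SOURCE B (Python) =====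
-- def trace_signs(n, depth=3):
--     """Trace the expansion of M(n) in terms of M(k) for k < n.
--
--     Groups odd divisor candidates d by the quotient q = n // d: all d in one
--     block contribute the same sub-expansion, so it is merged once, scaled by
--     the block size, instead of once per d.
--     """
--     if depth == 0 or n < 3:
--         return {n: 1}
--
--     result = {}
--     d = 3
--     while d <= n:
--         q = n // d
--         hi = n // q                      # largest d' with n // d' == q
--         ho = hi if hi % 2 == 1 else hi - 1   # largest odd such d'
--         cnt = (ho - d) // 2 + 1          # number of odd d' in the block
--         sub = trace_signs(q, depth - 1)
--         for k, c in sub.items():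
--             result[k] = result.get(k, 0) - cnt * c
--         d = ho + 2
--     return result
-- ===== Notes on version B (the rewrite author's own statement) =====
-- stated objective: faster
-- what changed: Instead of one recursive call per odd d in range(3,n+1,2), B groups the odd divisor candidates into O(sqrt n) blocks of equal quotient q = n//d and merges the sub-expansion of each distinct quotient once, scaled by the block size, so each recursion level does O(sqrt n) subcalls instead of O(n).
import Mathlib
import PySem

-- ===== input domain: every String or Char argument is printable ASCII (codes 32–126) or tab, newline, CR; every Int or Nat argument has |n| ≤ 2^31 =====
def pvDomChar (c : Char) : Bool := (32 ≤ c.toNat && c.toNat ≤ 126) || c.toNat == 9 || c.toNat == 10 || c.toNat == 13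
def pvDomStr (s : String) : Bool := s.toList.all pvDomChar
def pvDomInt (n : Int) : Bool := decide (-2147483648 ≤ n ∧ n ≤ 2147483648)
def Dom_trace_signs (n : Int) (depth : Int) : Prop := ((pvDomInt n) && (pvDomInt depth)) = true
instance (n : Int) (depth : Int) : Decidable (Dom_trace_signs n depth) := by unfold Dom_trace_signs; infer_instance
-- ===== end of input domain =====

-- B replaces A's per-divisor recursion (one subcall for every odd d in range(3,n+1,2)) by
-- divisor-block enumeration: odd candidates with equal quotient q = n//d are merged once,
-- scaled by the block size (objective: faster; a timing run measures the claim).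


-- arithmetic facts cited by the termination proofs of the ports
theorem pv_fdiv_pos {n d : Int} (hd : 3 ≤ d) (hdn : d ≤ n) : 1 ≤ PySem.Int.floordiv n d := by
  rw [PySem.Int.le_floordiv_iff_mul_le (by omega)]; omega

theorem pv_fdiv_mul_le {n d : Int} (hd : 0 < d) : PySem.Int.floordiv n d * d ≤ n := by
  exact (PySem.Int.le_floordiv_iff_mul_le hd).mp le_rfl

theorem pv_fdiv_lt {n d : Int} (hd : 3 ≤ d) (hdn : d ≤ n) :
    (PySem.Int.floordiv n d).toNat < n.toNat := by
  have h1 := pv_fdiv_pos hd hdn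
  have h2 := pv_fdiv_mul_le (n := n) (d := d) (by omega)
  nlinarith [h1, h2, Int.toNat_of_nonneg (show (0:Int) ≤ PySem.Int.floordiv n d by omega),
    Int.toNat_of_nonneg (show (0:Int) ≤ n by omega)]

theorem pv_le_fdiv_fdiv {n d : Int} (hd : 3 ≤ d) (hdn : d ≤ n) :
    d ≤ PySem.Int.floordiv n (PySem.Int.floordiv n d) := by
  have h1 := pv_fdiv_pos hd hdn
  have h2 := pv_fdiv_mul_le (n := n) (d := d) (by omega)
  rw [PySem.Int.le_floordiv_iff_mul_le (by omega)]
  nlinarith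

theorem pv_fdiv_le_self {n d : Int} (hn : 0 ≤ n) (hd : 1 ≤ d) :
    PySem.Int.floordiv n d ≤ n := by
  rw [PySem.Int.floordiv_eq_ediv_of_pos (by omega)]
  exact Int.ediv_le_self _ hn

-- ===== PORT A =====
def trace_signs (n : Int) (depth : Int) : List (Int × Int) :=
  if depth = 0 ∨ n < 1 then [(n, 1)]
  else
    -- for d in range(3, n + 1, 2): sub = trace_signs(n // d, depth - 1); result[k] -= coeff
    let result : PySem.Dict Int Int :=
      (PySem.List.pyRange 3 (n + 1) 2).attach.foldl
        (fun (r : PySem.Dict Int Int) d =>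
          (trace_signs (PySem.Int.floordiv n d.1) (depth - 1)).foldl
            (fun r kc => r.insert kc.1 (r.getD kc.1 0 - kc.2)) r)
        PySem.Dict.empty
    -- if not result: result[n] = 1
    let result := if result.items = [] then result.insert n 1 else result
    result.items
termination_by n.toNat
decreasing_by
  have hmem := d.2
  rw [PySem.List.mem_pyRange_iff_of_pos (by omega)] at hmem
  exact pv_fdiv_lt (by omega) (by omega)

-- ===== PORT B =====
mutual
-- the while-loop of B: d runs over odd divisor-block starts ('3 ≤ d' in the guard is only a
-- totality guard: the loop starts at d = 3 and d only increases, so behaviour is unchanged)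
def altLoop (n : Int) (depth : Int) (d : Int) (result : PySem.Dict Int Int) : PySem.Dict Int Int :=
  if h : 3 ≤ d ∧ d ≤ n then
    let q := PySem.Int.floordiv n d
    let hi := PySem.Int.floordiv n q
    let ho := if PySem.Int.mod hi 2 = 1 then hi else hi - 1
    let cnt := PySem.Int.floordiv (ho - d) 2 + 1
    let sub := trace_signs_alt q (depth - 1)
    altLoop n depth (ho + 2)
      (sub.foldl (fun r kc => r.insert kc.1 (r.getD kc.1 0 - cnt * kc.2)) result)
  else result
termination_by (n.toNat, (n + 1 - d).toNat)
decreasing_by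
  · apply Prod.Lex.left
    exact pv_fdiv_lt h.1 h.2
  · apply Prod.Lex.right
    have h1 := pv_fdiv_pos h.1 h.2
    have h2 := pv_le_fdiv_fdiv h.1 h.2
    have h3 := pv_fdiv_le_self (n := n) (d := PySem.Int.floordiv n d) (by omega) (by omega)
    have hm := PySem.Int.mod_eq_emod_of_pos (a := PySem.Int.floordiv n (PySem.Int.floordiv n d)) (b := 2) (by omega)
    split <;> omega

def trace_signs_alt (n : Int) (depth : Int) : List (Int × Int) :=
  if depth = 0 ∨ n < 3 then [(n, 1)]
  else (altLoop n depth 3 PySem.Dict.empty).items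
termination_by (n.toNat, n.toNat + 2)
decreasing_by
  apply Prod.Lex.right
  omega
end

-- ===== PRECONDITION & SPEC =====
def Spec_trace_signs (n : Int) (depth : Int) (out : List (Int × Int)) : Prop := out = trace_signs_alt n depth
instance (n : Int) (depth : Int) (out : List (Int × Int)) : Decidable (Spec_trace_signs n depth out) := by unfold Spec_trace_signs; infer_instance

-- ===== CLAIM (what is proved, stated in full; the proofs are below) =====
def Claim_equal_trace_signs : Prop := ∀ (n : Int) (depth : Int), Dom_trace_signs n depth → Spec_trace_signs n depth (trace_signs n depth)

-- ===== LEMMAS AND PROOFS =====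

-- the merge step shared (up to the constant weight) by both loops
def mrg (c : Int) (r : PySem.Dict Int Int) (sub : List (Int × Int)) : PySem.Dict Int Int :=
  sub.foldl (fun r kc => r.insert kc.1 (r.getD kc.1 0 - c * kc.2)) r

theorem mrg_nil (c : Int) (r : PySem.Dict Int Int) : mrg c r [] = r := rfl

theorem mrg_cons (c : Int) (r : PySem.Dict Int Int) (kc : Int × Int) (t : List (Int × Int)) :
    mrg c r (kc :: t) = mrg c (r.insert kc.1 (r.getD kc.1 0 - c * kc.2)) t := rfl

-- small Dict bridges
theorem keys_mk (l : List (Int × Int)) : (PySem.Dict.mk l).keys = l.map Prod.fst := rfl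

theorem get?_mk_cons (k1 v1 k : Int) (t : List (Int × Int)) :
    (PySem.Dict.mk ((k1, v1) :: t)).get? k = if k1 = k then some v1 else (PySem.Dict.mk t).get? k := by
  by_cases h : k1 = k <;> simp [PySem.Dict.get?, h]

theorem get?_mk_not_mem (t : List (Int × Int)) (k : Int) (hk : k ∉ t.map Prod.fst) :
    (PySem.Dict.mk t).get? k = none := by
  induction t with
  | nil => rfl
  | cons p t ih =>
    obtain ⟨k1, v1⟩ := p
    simp only [List.map_cons, List.mem_cons, not_or] at hk
    rw [get?_mk_cons, if_neg (fun h => hk.1 h.symm)]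
    exact ih hk.2

theorem get?_mrg_not_mem (c : Int) (sub : List (Int × Int)) (r : PySem.Dict Int Int) (k : Int)
    (hk : k ∉ sub.map Prod.fst) : (mrg c r sub).get? k = r.get? k := by
  induction sub generalizing r with
  | nil => rfl
  | cons kc t ih =>
    simp only [List.map_cons, List.mem_cons, not_or] at hk
    rw [mrg_cons, ih _ hk.2, PySem.Dict.get?_insert, if_neg hk.1]

theorem get?_mrg_mem (c : Int) (sub : List (Int × Int)) (r : PySem.Dict Int Int) (k v : Int)
    (hnd : (sub.map Prod.fst).Nodup) (hmem : (k, v) ∈ sub) :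
    (mrg c r sub).get? k = some (r.getD k 0 - c * v) := by
  induction sub generalizing r with
  | nil => simp at hmem
  | cons kc t ih =>
    obtain ⟨k1, v1⟩ := kc
    simp only [List.map_cons, List.nodup_cons] at hnd
    rcases List.mem_cons.mp hmem with heq | hmem'
    · injection heq with h1 h2
      subst h1; subst h2
      rw [mrg_cons, get?_mrg_not_mem _ _ _ _ hnd.1, PySem.Dict.get?_insert, if_pos rfl]
    · have hk1 : k ≠ k1 := by
        rintro rfl
        exact hnd.1 (List.mem_map.mpr ⟨(k, v), hmem', rfl⟩)
      rw [mrg_cons, ih _ hnd.2 hmem', PySem.Dict.getD_insert, if_neg hk1]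

theorem keys_mrg (c : Int) (sub : List (Int × Int)) (r : PySem.Dict Int Int)
    (hs : (sub.map Prod.fst).Nodup) :
    (mrg c r sub).keys = r.keys ++ (sub.map Prod.fst).filter (fun k => !(r.contains k)) := by
  induction sub generalizing r with
  | nil => simp [mrg_nil]
  | cons kc t ih =>
    obtain ⟨k1, v1⟩ := kc
    simp only [List.map_cons, List.nodup_cons] at hs
    rw [mrg_cons, ih _ hs.2]
    have hfil : List.filter (fun k => !((r.insert k1 (r.getD k1 0 - c * v1)).contains k)) (t.map Prod.fst)
        = List.filter (fun k => !(r.contains k)) (t.map Prod.fst) := by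
      refine List.filter_congr ?_
      intro x hx
      have hne : x ≠ k1 := by rintro rfl; exact hs.1 hx
      rw [PySem.Dict.contains_insert]
      simp [hne]
    rw [hfil]
    by_cases hc : r.contains k1
    · rw [PySem.Dict.keys_insert_of_contains _ _ hc]
      simp [List.filter_cons, hc]
    · rw [PySem.Dict.keys_insert_of_not_contains _ _ (by simpa using hc)]
      simp [List.filter_cons, hc, List.append_assoc]

theorem nodup_keys_mrg (c : Int) (sub : List (Int × Int)) (r : PySem.Dict Int Int)
    (hr : r.keys.Nodup) (hs : (sub.map Prod.fst).Nodup) : (mrg c r sub).keys.Nodup := by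
  rw [keys_mrg _ _ _ hs]
  refine List.Nodup.append hr (hs.filter _) ?_
  intro x hx1 hx2
  have hx3 := List.of_mem_filter hx2
  simp only [Bool.not_eq_true'] at hx3
  rw [← PySem.Dict.contains_iff_mem_keys] at hx1
  simp [hx1] at hx3

theorem assoc_ext : ∀ (l1 l2 : List (Int × Int)), l1.map Prod.fst = l2.map Prod.fst →
    (l1.map Prod.fst).Nodup → (∀ k, (PySem.Dict.mk l1).get? k = (PySem.Dict.mk l2).get? k) →
    l1 = l2 := by
  intro l1
  induction l1 with
  | nil =>
    intro l2 hk _ _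
    simpa using (List.map_eq_nil_iff.mp hk.symm).symm
  | cons p t1 ih =>
    intro l2 hk hnd hget
    obtain ⟨k, v⟩ := p
    cases l2 with
    | nil => simp at hk
    | cons p2 t2 =>
      obtain ⟨k2, v2⟩ := p2
      simp only [List.map_cons, List.cons.injEq] at hk
      obtain ⟨hkk, hkt⟩ := hk
      subst hkk
      simp only [List.map_cons, List.nodup_cons] at hnd
      have hv : v = v2 := by
        have h := hget k
        rw [get?_mk_cons, get?_mk_cons, if_pos rfl, if_pos rfl] at h
        exact Option.some.inj h
      subst hv
      have hget' : ∀ k', (PySem.Dict.mk t1).get? k' = (PySem.Dict.mk t2).get? k' := by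
        intro k'
        by_cases hkk : k' = k
        · subst hkk
          rw [get?_mk_not_mem _ _ hnd.1, get?_mk_not_mem _ _ (hkt ▸ hnd.1)]
        · have h := hget k'
          rw [get?_mk_cons, get?_mk_cons, if_neg (fun h => hkk h.symm), if_neg (fun h => hkk h.symm)] at h
          exact h
      rw [ih t2 hkt hnd.2 hget']

theorem dict_ext (d1 d2 : PySem.Dict Int Int) (hk : d1.keys = d2.keys) (hnd : d1.keys.Nodup)
    (hget : ∀ k, d1.get? k = d2.get? k) : d1 = d2 := by
  obtain ⟨l1⟩ := d1
  obtain ⟨l2⟩ := d2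
  simp only [keys_mk] at hk hnd
  exact congrArg PySem.Dict.mk (assoc_ext l1 l2 hk hnd hget)

theorem contains_of_mem_keys_mrg (c : Int) (sub : List (Int × Int)) (r : PySem.Dict Int Int)
    (hs : (sub.map Prod.fst).Nodup) (k : Int) (hk : k ∈ sub.map Prod.fst) :
    (mrg c r sub).contains k = true := by
  obtain ⟨⟨k', v⟩, hmem, rfl⟩ := List.mem_map.mp hk
  have hsome := get?_mrg_mem c sub r _ v hs hmem
  rcases Bool.eq_false_or_eq_true ((mrg c r sub).contains (k', v).1) with ht | hf
  · exact ht
  · rw [(PySem.Dict.get?_eq_none_iff_contains _ _).mpr hf] at hsome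
    exact absurd hsome (by simp)

theorem mrg_mrg (a b : Int) (sub : List (Int × Int)) (r : PySem.Dict Int Int)
    (hr : r.keys.Nodup) (hs : (sub.map Prod.fst).Nodup) :
    mrg b (mrg a r sub) sub = mrg (a + b) r sub := by
  apply dict_ext
  · rw [keys_mrg _ _ _ hs, keys_mrg _ _ _ hs, keys_mrg _ _ _ hs]
    have hnil : (sub.map Prod.fst).filter (fun k => !((mrg a r sub).contains k)) = [] := by
      rw [List.filter_eq_nil_iff]
      intro k hk
      simp [contains_of_mem_keys_mrg a sub r hs k hk]
    rw [hnil, List.append_nil]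
  · exact nodup_keys_mrg _ _ _ (nodup_keys_mrg _ _ _ hr hs) hs
  · intro k
    by_cases hk : k ∈ sub.map Prod.fst
    · obtain ⟨⟨k', v⟩, hmem, hfst⟩ := List.mem_map.mp hk
      subst hfst
      rw [get?_mrg_mem _ _ _ _ v hs hmem, get?_mrg_mem _ _ _ _ v hs hmem]
      have hg : (mrg a r sub).getD (k', v).1 0 = r.getD (k', v).1 0 - a * v := by
        rw [PySem.Dict.getD_eq_get?_getD, get?_mrg_mem _ _ _ _ v hs hmem]; rfl
      rw [hg]
      congr 1
      ring
    · rw [get?_mrg_not_mem _ _ _ _ hk, get?_mrg_not_mem _ _ _ _ hk, get?_mrg_not_mem _ _ _ _ hk]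

theorem foldl_attach_spec (l : List Int) (F : PySem.Dict Int Int → Int → PySem.Dict Int Int)
    (init : PySem.Dict Int Int) :
    l.attach.foldl (fun r d => F r d.1) init = l.foldl F init := List.foldl_attach

theorem mrg_one (r : PySem.Dict Int Int) (sub : List (Int × Int)) :
    sub.foldl (fun r kc => r.insert kc.1 (r.getD kc.1 0 - kc.2)) r = mrg 1 r sub := by
  unfold mrg
  simp only [one_mul]

theorem pv_q_const {n d d' : Int} (hd : 3 ≤ d) (hdn : d ≤ n) (h1 : d ≤ d')
    (h2 : d' ≤ PySem.Int.floordiv n (PySem.Int.floordiv n d)) :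
    PySem.Int.floordiv n d' = PySem.Int.floordiv n d := by
  have hq := pv_fdiv_pos hd hdn
  have hqd := pv_fdiv_mul_le (n := n) (d := d) (by omega)
  have hlow : PySem.Int.floordiv n d ≤ PySem.Int.floordiv n d' := by
    rw [PySem.Int.le_floordiv_iff_mul_le (by omega : (0:Int) < d')]
    have h3 := (PySem.Int.le_floordiv_iff_mul_le (by omega : (0:Int) < PySem.Int.floordiv n d)).mp h2
    nlinarith
  have hup : PySem.Int.floordiv n d' ≤ PySem.Int.floordiv n d := by
    by_contra hcon
    push_neg at hcon
    have h3 : (PySem.Int.floordiv n d + 1) * d' ≤ n :=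
      (PySem.Int.le_floordiv_iff_mul_le (by omega : (0:Int) < d')).mp (by omega)
    have h4 : ¬ ((PySem.Int.floordiv n d + 1) * d ≤ n) := by
      intro hcc
      have := (PySem.Int.le_floordiv_iff_mul_le (by omega : (0:Int) < d)).mpr hcc
      omega
    nlinarith
  omega

theorem pyRange_two_nil {a b : Int} (h : b ≤ a) : PySem.List.pyRange a b 2 = [] := by
  rw [PySem.List.pyRange_of_pos _ _ (by omega : (0:Int) < 2)]
  simp [show ¬ a < b by omega]

theorem pyRange_two_cons {a b : Int} (h : a < b) :
    PySem.List.pyRange a b 2 = a :: PySem.List.pyRange (a + 2) b 2 := by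
  rw [PySem.List.pyRange_of_pos _ _ (by omega : (0:Int) < 2),
      PySem.List.pyRange_of_pos _ _ (by omega : (0:Int) < 2)]
  by_cases h2 : a + 2 < b
  · have hlen : ((b - a + 2 - 1) / 2).toNat = ((b - (a + 2) + 2 - 1) / 2).toNat + 1 := by omega
    rw [if_pos h, if_pos h2, hlen, List.range_succ_eq_map]
    simp only [List.map_cons, List.map_map]
    refine congrArg₂ List.cons (by simp) ?_
    refine List.map_congr_left ?_
    intro i _
    simp only [Function.comp_apply]
    push_cast
    ring
  · rw [if_pos h, if_neg h2]
    have hlen : ((b - a + 2 - 1) / 2).toNat = 1 := by omega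
    rw [hlen]
    simp

-- one-step unfoldings of the B-loop
theorem altLoop_stop (n depth d : Int) (r : PySem.Dict Int Int) (h : ¬ (3 ≤ d ∧ d ≤ n)) :
    altLoop n depth d r = r := by
  rw [altLoop, dif_neg h]

theorem altLoop_step (n depth d : Int) (r : PySem.Dict Int Int) (h3 : 3 ≤ d) (hdn : d ≤ n) :
    altLoop n depth d r =
      altLoop n depth
        ((if PySem.Int.mod (PySem.Int.floordiv n (PySem.Int.floordiv n d)) 2 = 1 then
            PySem.Int.floordiv n (PySem.Int.floordiv n d)
          else PySem.Int.floordiv n (PySem.Int.floordiv n d) - 1) + 2)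
        (mrg (PySem.Int.floordiv
                ((if PySem.Int.mod (PySem.Int.floordiv n (PySem.Int.floordiv n d)) 2 = 1 then
                    PySem.Int.floordiv n (PySem.Int.floordiv n d)
                  else PySem.Int.floordiv n (PySem.Int.floordiv n d) - 1) - d) 2 + 1)
             r (trace_signs_alt (PySem.Int.floordiv n d) (depth - 1))) := by
  rw [altLoop, dif_pos ⟨h3, hdn⟩]
  rfl

theorem fold_block (n depth q : Int)
    (hsub : ((trace_signs_alt q (depth - 1)).map Prod.fst).Nodup) :
    ∀ (m : Nat) (d : Int) (r : PySem.Dict Int Int), 1 ≤ m → 3 ≤ d →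
      d + 2 * ((m : Int) - 1) ≤ n →
      (∀ d'', d ≤ d'' → d'' ≤ d + 2 * ((m : Int) - 1) → PySem.Int.floordiv n d'' = q) →
      r.keys.Nodup →
      (PySem.List.pyRange d (n + 1) 2).foldl
        (fun r d' => mrg 1 r (trace_signs_alt (PySem.Int.floordiv n d') (depth - 1))) r
      = (PySem.List.pyRange (d + 2 * (m : Int)) (n + 1) 2).foldl
        (fun r d' => mrg 1 r (trace_signs_alt (PySem.Int.floordiv n d') (depth - 1)))
        (mrg (m : Int) r (trace_signs_alt q (depth - 1))) := by
  intro m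
  induction m with
  | zero => intro d r hm; omega
  | succ m ih =>
    intro d r _ hd3 hbound hq hr
    push_cast at hbound
    have hdn : d ≤ n := by omega
    rw [pyRange_two_cons (by omega : d < n + 1)]
    simp only [List.foldl_cons]
    rw [hq d le_rfl (by push_cast; omega)]
    by_cases hm0 : m = 0
    · subst hm0
      norm_num
    · have h1m : 1 ≤ m := by omega
      rw [ih (d + 2) (mrg 1 r (trace_signs_alt q (depth - 1))) h1m (by omega)
            (by push_cast; omega)
            (fun d'' ha hb => hq d'' (by omega) (by push_cast at hb ⊢; omega))
            (nodup_keys_mrg _ _ _ hr hsub)]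
      rw [mrg_mrg 1 (m : Int) _ _ hr hsub]
      have hc1 : (1 : Int) + (m : Int) = ((m + 1 : Nat) : Int) := by push_cast; ring
      have hc2 : d + 2 + 2 * (m : Int) = d + 2 * ((m + 1 : Nat) : Int) := by push_cast; ring
      rw [hc1, hc2]

theorem loop_eq (n depth : Int)
    (hnd_sub : ∀ (m dep : Int), ((trace_signs_alt m dep).map Prod.fst).Nodup) :
    ∀ (K : Nat) (d : Int) (r : PySem.Dict Int Int), (n + 1 - d).toNat ≤ K → 3 ≤ d →
      d % 2 = 1 → r.keys.Nodup →
      (PySem.List.pyRange d (n + 1) 2).foldl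
        (fun r d' => mrg 1 r (trace_signs_alt (PySem.Int.floordiv n d') (depth - 1))) r
      = altLoop n depth d r := by
  intro K
  induction K with
  | zero =>
    intro d r hK hd3 hodd hr
    rw [pyRange_two_nil (by omega), altLoop_stop _ _ _ _ (by omega)]
    rfl
  | succ K ih =>
    intro d r hK hd3 hodd hr
    by_cases hdn : d ≤ n
    · rw [altLoop_step _ _ _ _ hd3 hdn]
      have hq1 : 1 ≤ PySem.Int.floordiv n d := pv_fdiv_pos hd3 hdn
      have hhid : d ≤ PySem.Int.floordiv n (PySem.Int.floordiv n d) := pv_le_fdiv_fdiv hd3 hdn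
      have hhin : PySem.Int.floordiv n (PySem.Int.floordiv n d) ≤ n :=
        pv_fdiv_le_self (by omega) (by omega)
      set hi := PySem.Int.floordiv n (PySem.Int.floordiv n d) with hhidef
      have hmod : PySem.Int.mod hi 2 = hi % 2 := PySem.Int.mod_eq_emod_of_pos (by omega)
      rw [hmod]
      set ho := if hi % 2 = 1 then hi else hi - 1 with hhodef
      have hho_odd : ho % 2 = 1 := by rw [hhodef]; split_ifs <;> omega
      have hho_ge : d ≤ ho := by rw [hhodef]; split_ifs <;> omega
      have hho_le : ho ≤ n := by rw [hhodef]; split_ifs <;> omega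
      have hho_hi : ho ≤ hi := by rw [hhodef]; split_ifs <;> omega
      have hcnt : PySem.Int.floordiv (ho - d) 2 = (ho - d) / 2 :=
        PySem.Int.floordiv_eq_ediv_of_pos (by omega)
      rw [hcnt]
      set m : Nat := ((ho - d) / 2 + 1).toNat with hmdef
      have hmcast : (m : Int) = (ho - d) / 2 + 1 := by omega
      have hdm : d + 2 * ((m : Int) - 1) = ho := by omega
      have hq : ∀ d'', d ≤ d'' → d'' ≤ d + 2 * ((m : Int) - 1) →
          PySem.Int.floordiv n d'' = PySem.Int.floordiv n d := by
        intro d'' ha hb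
        exact pv_q_const hd3 hdn ha (by omega)
      rw [fold_block n depth (PySem.Int.floordiv n d) (hnd_sub _ _) m d r (by omega) hd3
            (by omega) hq hr]
      have hstep : d + 2 * (m : Int) = ho + 2 := by omega
      rw [hstep, ← hmcast]
      exact ih (ho + 2) _ (by omega) (by omega) (by omega)
        (nodup_keys_mrg _ _ _ hr (hnd_sub _ _))
    · rw [pyRange_two_nil (by omega), altLoop_stop _ _ _ _ (by omega)]
      rfl

theorem alt_nodup_all : ∀ (N : Nat) (n depth : Int), n.toNat ≤ N →
    ((trace_signs_alt n depth).map Prod.fst).Nodup := by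
  intro N
  induction N with
  | zero =>
    intro n depth hN
    rw [trace_signs_alt, if_pos (Or.inr (by omega : n < 3))]
    simp
  | succ N ihN =>
    intro n depth hN
    rw [trace_signs_alt]
    by_cases hc : depth = 0 ∨ n < 3
    · rw [if_pos hc]; simp
    · rw [if_neg hc]
      push_neg at hc
      have hloop : ∀ (K : Nat) (d : Int) (r : PySem.Dict Int Int), (n + 1 - d).toNat ≤ K →
          3 ≤ d → r.keys.Nodup → (altLoop n depth d r).keys.Nodup := by
        intro K
        induction K with
        | zero =>
          intro d r hK h3 hr
          rw [altLoop_stop _ _ _ _ (by omega)]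
          exact hr
        | succ K ihK =>
          intro d r hK h3 hr
          by_cases hg : d ≤ n
          · rw [altLoop_step _ _ _ _ h3 hg]
            have hsub : ((trace_signs_alt (PySem.Int.floordiv n d) (depth - 1)).map Prod.fst).Nodup := by
              refine ihN _ _ ?_
              have := pv_fdiv_lt h3 hg
              omega
            have hq1 : 1 ≤ PySem.Int.floordiv n d := pv_fdiv_pos h3 hg
            have hhid : d ≤ PySem.Int.floordiv n (PySem.Int.floordiv n d) := pv_le_fdiv_fdiv h3 hg
            have hhin : PySem.Int.floordiv n (PySem.Int.floordiv n d) ≤ n :=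
              pv_fdiv_le_self (by omega) (by omega)
            refine ihK _ _ ?_ (by split_ifs <;> omega) (nodup_keys_mrg _ _ _ hr hsub)
            split_ifs <;> omega
          · rw [altLoop_stop _ _ _ _ (by omega)]
            exact hr
      exact hloop (n + 1 - 3).toNat 3 PySem.Dict.empty (by omega) (by omega)
        (PySem.Dict.nodup_keys_empty)

theorem alt_nodup (n depth : Int) : ((trace_signs_alt n depth).map Prod.fst).Nodup :=
  alt_nodup_all n.toNat n depth le_rfl

theorem mrg_ne_nil (c : Int) (sub : List (Int × Int)) (r : PySem.Dict Int Int)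
    (hs : (sub.map Prod.fst).Nodup) (h : sub ≠ [] ∨ r.items ≠ []) : (mrg c r sub).items ≠ [] := by
  intro hnil
  have hkeys : (mrg c r sub).keys = [] := by
    show (mrg c r sub).items.map Prod.fst = []
    rw [hnil]
    rfl
  rw [keys_mrg _ _ _ hs] at hkeys
  rcases List.append_eq_nil_iff.mp hkeys with ⟨hk1, hk2⟩
  rcases h with hsub | hrit
  · have hne : sub.map Prod.fst ≠ [] := by simpa using hsub
    obtain ⟨k, hk⟩ := List.exists_mem_of_ne_nil _ hne
    have h2 := List.filter_eq_nil_iff.mp hk2 k hk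
    have hcontains : r.contains k = true := by simpa using h2
    have hmemk := (PySem.Dict.contains_iff_mem_keys r k).mp hcontains
    rw [hk1] at hmemk
    exact absurd hmemk (List.not_mem_nil)
  · exact hrit (List.map_eq_nil_iff.mp hk1)

theorem alt_ne_nil_all : ∀ (N : Nat) (n depth : Int), n.toNat ≤ N →
    trace_signs_alt n depth ≠ [] := by
  intro N
  induction N with
  | zero =>
    intro n depth hN
    rw [trace_signs_alt, if_pos (Or.inr (by omega : n < 3))]
    simp
  | succ N ihN =>
    intro n depth hN
    rw [trace_signs_alt]
    by_cases hc : depth = 0 ∨ n < 3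
    · rw [if_pos hc]; simp
    · rw [if_neg hc]
      push_neg at hc
      have hloop : ∀ (K : Nat) (d : Int) (r : PySem.Dict Int Int), (n + 1 - d).toNat ≤ K →
          3 ≤ d → r.keys.Nodup → (r.items ≠ [] ∨ d ≤ n) → (altLoop n depth d r).items ≠ [] := by
        intro K
        induction K with
        | zero =>
          intro d r hK h3 hr hd
          rw [altLoop_stop _ _ _ _ (by omega)]
          rcases hd with h | h
          · exact h
          · omega
        | succ K ihK =>
          intro d r hK h3 hr hd
          by_cases hg : d ≤ n
          · rw [altLoop_step _ _ _ _ h3 hg]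
            have hlt := pv_fdiv_lt h3 hg
            have hsubnd : ((trace_signs_alt (PySem.Int.floordiv n d) (depth - 1)).map Prod.fst).Nodup :=
              alt_nodup _ _
            have hsubne : trace_signs_alt (PySem.Int.floordiv n d) (depth - 1) ≠ [] := by
              refine ihN _ _ ?_
              omega
            have hq1 : 1 ≤ PySem.Int.floordiv n d := pv_fdiv_pos h3 hg
            have hhid : d ≤ PySem.Int.floordiv n (PySem.Int.floordiv n d) := pv_le_fdiv_fdiv h3 hg
            have hhin : PySem.Int.floordiv n (PySem.Int.floordiv n d) ≤ n :=
              pv_fdiv_le_self (by omega) (by omega)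
            refine ihK _ _ ?_ (by split_ifs <;> omega) (nodup_keys_mrg _ _ _ hr hsubnd)
              (Or.inl (mrg_ne_nil _ _ _ hsubnd (Or.inl hsubne)))
            split_ifs <;> omega
          · rw [altLoop_stop _ _ _ _ (by omega)]
            rcases hd with h | h
            · exact h
            · omega
      exact hloop (n + 1 - 3).toNat 3 PySem.Dict.empty (by omega) (by omega)
        PySem.Dict.nodup_keys_empty (Or.inr (by omega))

theorem alt_ne_nil (n depth : Int) : trace_signs_alt n depth ≠ [] :=
  alt_ne_nil_all n.toNat n depth le_rfl

theorem main_all : ∀ (N : Nat) (n depth : Int), n.toNat ≤ N →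
    trace_signs n depth = trace_signs_alt n depth := by
  intro N
  induction N with
  | zero =>
    intro n depth hN
    rw [trace_signs, trace_signs_alt, if_pos (Or.inr (by omega : n < 1)),
        if_pos (Or.inr (by omega : n < 3))]
  | succ N ihN =>
    intro n depth hN
    by_cases hc : depth = 0 ∨ n < 1
    · rw [trace_signs, trace_signs_alt, if_pos hc, if_pos (hc.imp id (by omega))]
    · push_neg at hc
      by_cases h3 : n < 3
      · rw [trace_signs, if_neg (by push_neg; exact hc), trace_signs_alt,
            if_pos (Or.inr h3)]
        rw [pyRange_two_nil (by omega : n + 1 ≤ 3)]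
        simp [PySem.Dict.empty, PySem.Dict.insert, PySem.Dict.contains]
      · push_neg at h3
        rw [trace_signs, if_neg (by push_neg; exact hc)]
        rw [foldl_attach_spec _
              (fun (r : PySem.Dict Int Int) d' =>
                (trace_signs (PySem.Int.floordiv n d') (depth - 1)).foldl
                  (fun r kc => r.insert kc.1 (r.getD kc.1 0 - kc.2)) r) _]
        rw [PySem.List.foldl_congr_mem _ _
              (fun (r : PySem.Dict Int Int) d' =>
                mrg 1 r (trace_signs_alt (PySem.Int.floordiv n d') (depth - 1))) _ (by
          intro acc x hx
          rw [PySem.List.mem_pyRange_iff_of_pos (by omega)] at hx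
          rw [ihN _ (depth - 1)
                (by have := pv_fdiv_lt (show 3 ≤ x by omega) (show x ≤ n by omega); omega)]
          exact mrg_one acc _)]
        rw [loop_eq n depth alt_nodup (n + 1 - 3).toNat 3 PySem.Dict.empty (by omega)
              (by omega) (by omega) PySem.Dict.nodup_keys_empty]
        have hne : (altLoop n depth 3 PySem.Dict.empty).items ≠ [] := by
          have h := alt_ne_nil n depth
          rw [trace_signs_alt, if_neg (by push_neg; exact ⟨hc.1, by omega⟩)] at h
          exact h
        show (if (altLoop n depth 3 PySem.Dict.empty).items = []
              then (altLoop n depth 3 PySem.Dict.empty).insert n 1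
              else altLoop n depth 3 PySem.Dict.empty).items = trace_signs_alt n depth
        rw [if_neg hne, trace_signs_alt, if_neg (by push_neg; exact ⟨hc.1, by omega⟩)]

theorem main_eq (n depth : Int) : trace_signs n depth = trace_signs_alt n depth :=
  main_all n.toNat n depth le_rfl

-- ===== VERDICT (by name: the statement is the Claim_ definition above) =====
theorem trace_signs_spec : Claim_equal_trace_signs := by
  intro n depth _
  unfold Spec_trace_signs
  exact main_eq n depth
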